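-- pv_equiv track=rewrite | github.com/lijianmin01/Third_college_grade | 机器学习框架/竞赛/two/two.py | split_test_data
-- ===== SOURCE A (Python) =====
-- def split_test_data(test):
--     dataSets = []
--     for i in range(4):
--         dataSets.append([])
--
--     for a_data in test:
--         if a_data[-2] == 1:
--             dataSets[0].append(a_data)
--         elif a_data[-2] == 2:
--             dataSets[1].append(a_data)
--         elif a_data[-2] == 3:
--             dataSets[2].append(a_data)
--         elif a_data[-2] == 4:
--             dataSets[3].append(a_data)
--
--     return dataSets
-- ===== SOURCE B (Python) =====
-- def split_test_data(test):
--     return [[row for row in test if row[-2] == k] for k in range(1, 5)]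
-- ===== Notes on version B (the rewrite author's own statement) =====
-- stated objective: idiomatic
-- what changed: Replaced the single-pass if/elif dispatch into four mutable buckets by a comprehension that builds each bucket as an independent filter of test for each target value 1..4.
import Mathlib
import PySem

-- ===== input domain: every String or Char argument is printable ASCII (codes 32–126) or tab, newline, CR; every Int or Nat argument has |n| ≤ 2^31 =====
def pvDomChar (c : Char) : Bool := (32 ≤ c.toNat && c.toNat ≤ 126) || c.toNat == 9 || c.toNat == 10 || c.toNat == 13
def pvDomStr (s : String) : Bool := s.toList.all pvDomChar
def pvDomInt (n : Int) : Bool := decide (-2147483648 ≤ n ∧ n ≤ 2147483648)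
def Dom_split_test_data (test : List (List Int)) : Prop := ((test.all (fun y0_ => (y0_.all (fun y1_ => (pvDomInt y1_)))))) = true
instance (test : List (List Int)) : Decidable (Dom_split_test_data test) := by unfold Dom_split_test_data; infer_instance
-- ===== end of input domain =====

-- ===== PORT A =====
-- B changes A's single pass with if/elif dispatch into four independent filters (idiomatic comprehension).
-- literal port of A: one left fold over test carrying the four buckets; dataSets[i].append = snoc
def split_test_data (test : List (List Int)) : List (List (List Int)) :=
  let r := test.foldl
    (fun (ds : List (List Int) × List (List Int) × List (List Int) × List (List Int)) a_data =>
      match PySem.List.pyGet? a_data (-2) with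
      | some v =>
        if v = 1 then (ds.1 ++ [a_data], ds.2.1, ds.2.2.1, ds.2.2.2)
        else if v = 2 then (ds.1, ds.2.1 ++ [a_data], ds.2.2.1, ds.2.2.2)
        else if v = 3 then (ds.1, ds.2.1, ds.2.2.1 ++ [a_data], ds.2.2.2)
        else if v = 4 then (ds.1, ds.2.1, ds.2.2.1, ds.2.2.2 ++ [a_data])
        else ds
      | none => ds)  -- Python raises IndexError here; Pre_ excludes such rows
    ([], [], [], [])
  [r.1, r.2.1, r.2.2.1, r.2.2.2]

-- ===== PORT B =====
def split_test_data_alt (test : List (List Int)) : List (List (List Int)) :=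
  (PySem.List.pyRange 1 5 1).map
    (fun k => test.filter (fun row => PySem.List.pyGet? row (-2) == some k))

-- ===== PRECONDITION & SPEC =====
-- Pre_ excludes rows of length < 2, on which A's a_data[-2] raises IndexError (B raises there too).
def Pre_split_test_data (test : List (List Int)) : Prop :=
  ∀ row ∈ test, 2 ≤ row.length
instance (test : List (List Int)) : Decidable (Pre_split_test_data test) := by
  unfold Pre_split_test_data; infer_instance
def pvWitness_split_test_data : List (List Int) := [[1, 2, 3], [5, 3, 9], [0, 4, 0], [1, 1]]
def Spec_split_test_data (test : List (List Int)) (out : List (List (List Int))) : Prop := out = split_test_data_alt test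
instance (test : List (List Int)) (out : List (List (List Int))) : Decidable (Spec_split_test_data test out) := by unfold Spec_split_test_data; infer_instance

-- ===== CLAIM (what is proved, stated in full; the proofs are below) =====
def Claim_equal_split_test_data : Prop := ∀ (test : List (List Int)), Dom_split_test_data test → Pre_split_test_data test → Spec_split_test_data test (split_test_data test)

-- ===== LEMMAS AND PROOFS =====
theorem split_fold_inv (test : List (List Int))
    (a b c d : List (List Int)) :
    test.foldl
      (fun (ds : List (List Int) × List (List Int) × List (List Int) × List (List Int)) a_data =>
        match PySem.List.pyGet? a_data (-2) with
        | some v =>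
          if v = 1 then (ds.1 ++ [a_data], ds.2.1, ds.2.2.1, ds.2.2.2)
          else if v = 2 then (ds.1, ds.2.1 ++ [a_data], ds.2.2.1, ds.2.2.2)
          else if v = 3 then (ds.1, ds.2.1, ds.2.2.1 ++ [a_data], ds.2.2.2)
          else if v = 4 then (ds.1, ds.2.1, ds.2.2.1, ds.2.2.2 ++ [a_data])
          else ds
        | none => ds)
      (a, b, c, d)
    = (a ++ test.filter (fun row => PySem.List.pyGet? row (-2) == some 1),
       b ++ test.filter (fun row => PySem.List.pyGet? row (-2) == some 2),
       c ++ test.filter (fun row => PySem.List.pyGet? row (-2) == some 3),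
       d ++ test.filter (fun row => PySem.List.pyGet? row (-2) == some 4)) := by
  induction test generalizing a b c d with
  | nil => simp
  | cons hd tl ih =>
    simp only [List.foldl_cons, List.filter_cons]
    cases h : PySem.List.pyGet? hd (-2) with
    | none => simp [ih]
    | some v =>
      by_cases h1 : v = 1
      · subst h1; simp [ih]
      · by_cases h2 : v = 2
        · subst h2; simp [h1, ih]
        · by_cases h3 : v = 3
          · subst h3; simp [h1, ih]
          · by_cases h4 : v = 4
            · subst h4; simp [h1, ih]
            · simp [h1, h2, h3, h4, ih]

-- ===== VERDICT (by name: the statement is the Claim_ definition above) =====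
theorem split_test_data_spec : Claim_equal_split_test_data := by
  intro test _ _
  show split_test_data test = split_test_data_alt test
  unfold split_test_data split_test_data_alt
  rw [split_fold_inv]
  simp [show PySem.List.pyRange 1 5 1 = [1, 2, 3, 4] from by decide]
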